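-- pv_equiv track=rewrite | github.com/HaRiNii004/auto_tarde | backend/extract_text.py | find_new_messages
-- ===== SOURCE A (Python) =====
-- def find_new_messages(current_lines, previous_lines):
--     """Finds lines that are new compared to the previous capture."""
--     new_messages = []
--     previous_set = set(previous_lines)
--     for line in current_lines:
--         if line not in previous_set:
--             new_messages.append(line)
--             previous_set.add(line)
--     return new_messages
-- ===== SOURCE B (Python) =====
-- def find_new_messages(current_lines, previous_lines):
--     """Finds lines that are new compared to the previous capture."""
--     unique = list(dict.fromkeys(current_lines))
--     previous_set = set(previous_lines)
--     return [line for line in unique if line not in previous_set]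
-- ===== Notes on version B (the rewrite author's own statement) =====
-- stated objective: simpler
-- what changed: Replaces the single loop that filters while mutating a growing membership set with two independent passes: an order-preserving dedup (dict.fromkeys) followed by a filter against a static set of previous lines.
import Mathlib
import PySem

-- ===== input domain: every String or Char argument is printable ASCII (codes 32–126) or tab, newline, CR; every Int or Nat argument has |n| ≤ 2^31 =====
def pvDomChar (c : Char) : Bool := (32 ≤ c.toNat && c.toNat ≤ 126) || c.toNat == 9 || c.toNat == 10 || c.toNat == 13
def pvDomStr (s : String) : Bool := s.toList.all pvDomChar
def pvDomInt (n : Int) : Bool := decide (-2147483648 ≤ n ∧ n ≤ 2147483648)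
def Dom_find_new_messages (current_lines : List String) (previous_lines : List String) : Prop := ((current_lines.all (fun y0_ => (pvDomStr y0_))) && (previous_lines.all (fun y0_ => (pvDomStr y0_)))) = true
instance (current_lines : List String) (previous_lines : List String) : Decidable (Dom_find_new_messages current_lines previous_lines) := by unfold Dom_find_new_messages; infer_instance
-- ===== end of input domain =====

-- B replaces A's single filter-while-mutating loop by two passes (ordered dedup, then a static-set filter); objective: simpler.


-- ===== PORT A =====
-- one loop over current_lines carrying (new_messages, previous_set); the set grows as lines are emitted
def find_new_messages (current_lines : List String) (previous_lines : List String) : List String :=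
  (current_lines.foldl
    (fun (st : List String × PySem.Set String) line =>
      if PySem.Set.contains st.2 line then st
      else (st.1 ++ [line], PySem.Set.add st.2 line))
    ([], PySem.Set.ofList previous_lines)).1

-- ===== PORT B =====
-- ordered dedup first (dict.fromkeys = PySem.List.dedup), then a filter against the static previous set
def find_new_messages_alt (current_lines : List String) (previous_lines : List String) : List String :=
  let unique := PySem.List.dedup current_lines
  let previous_set := PySem.Set.ofList previous_lines
  unique.filter (fun line => !(PySem.Set.contains previous_set line))

-- ===== PRECONDITION & SPEC =====
def Spec_find_new_messages (current_lines : List String) (previous_lines : List String) (out : List String) : Prop := out = find_new_messages_alt current_lines previous_lines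
instance (current_lines : List String) (previous_lines : List String) (out : List String) : Decidable (Spec_find_new_messages current_lines previous_lines out) := by unfold Spec_find_new_messages; infer_instance

-- ===== CLAIM (what is proved, stated in full; the proofs are below) =====
def Claim_equal_find_new_messages : Prop := ∀ (current_lines : List String) (previous_lines : List String), Dom_find_new_messages current_lines previous_lines → Spec_find_new_messages current_lines previous_lines (find_new_messages current_lines previous_lines)

-- ===== LEMMAS AND PROOFS =====

-- Loop invariant: A's state is (seen.filter (new wrt prev), s) where membership in s is
-- membership in previous_lines or in the dedup-accumulator seen.
theorem find_new_messages_loop (previous_lines : List String)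
    (cur : List String) : ∀ (seen : List String) (s : PySem.Set String),
    (∀ x : String, x ∈ s ↔ x ∈ previous_lines ∨ x ∈ seen) →
    (cur.foldl
      (fun (st : List String × PySem.Set String) line =>
        if PySem.Set.contains st.2 line then st
        else (st.1 ++ [line], PySem.Set.add st.2 line))
      (seen.filter (fun line => !(PySem.Set.contains (PySem.Set.ofList previous_lines) line)), s)).1
    = (cur.foldl PySem.Set.add seen).filter
        (fun line => !(PySem.Set.contains (PySem.Set.ofList previous_lines) line)) := by
  induction cur with
  | nil => intro seen s _; simp
  | cons line rest ih =>
    intro seen s hmem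
    simp only [List.foldl_cons]
    by_cases h : line ∈ s
    · rw [if_pos ((PySem.Set.contains_iff _ _).mpr h)]
      by_cases hl : line ∈ seen
      · rw [PySem.Set.add_of_mem hl]
        exact ih seen s hmem
      · have hprev : line ∈ previous_lines := ((hmem line).mp h).resolve_right hl
        rw [PySem.Set.add_of_not_mem hl]
        have hfilter : (seen ++ [line]).filter
            (fun l => !(PySem.Set.contains (PySem.Set.ofList previous_lines) l)) =
            seen.filter (fun l => !(PySem.Set.contains (PySem.Set.ofList previous_lines) l)) := by
          simp [List.filter_append, PySem.Set.mem_ofList, hprev]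
        rw [← hfilter]
        apply ih
        intro x
        rw [hmem x]
        by_cases hx : x = line
        · subst hx; simp [hprev]
        · simp [List.mem_append, hx]
    · rw [if_neg (fun hc => h ((PySem.Set.contains_iff _ _).mp hc))]
      have hl : line ∉ seen := fun hx => h ((hmem line).mpr (Or.inr hx))
      have hprev : line ∉ previous_lines := fun hx => h ((hmem line).mpr (Or.inl hx))
      have hfilter : (seen ++ [line]).filter
          (fun l => !(PySem.Set.contains (PySem.Set.ofList previous_lines) l)) =
          seen.filter (fun l => !(PySem.Set.contains (PySem.Set.ofList previous_lines) l)) ++ [line] := by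
        simp [List.filter_append, PySem.Set.mem_ofList, hprev]
      rw [PySem.Set.add_of_not_mem hl, ← hfilter]
      apply ih
      intro x
      rw [PySem.Set.mem_add, hmem x]
      by_cases hx : x = line
      · subst hx; simp
      · simp [List.mem_append, hx]

-- ===== VERDICT (by name: the statement is the Claim_ definition above) =====
theorem find_new_messages_spec : Claim_equal_find_new_messages := by
  intro current_lines previous_lines _
  unfold Spec_find_new_messages find_new_messages find_new_messages_alt
  have := find_new_messages_loop previous_lines current_lines [] (PySem.Set.ofList previous_lines)
    (by intro x; simp [PySem.Set.mem_ofList])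
  simpa [PySem.List.dedup_eq_ofList, PySem.Set.ofList_eq_foldl] using this
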